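-- pv_equiv track=rewrite | github.com/RamananVr/Leetcodepython | arrays/2819_unknown_title.py | count_beautiful_subarrays
-- ===== SOURCE A (Python) =====
-- def count_beautiful_subarrays(nums):
--     """
--     Function to count the number of beautiful subarrays in the given array.
--
--     Args:
--     nums (List[int]): The input array.
--
--     Returns:
--     int: The number of beautiful subarrays.
--     """
--     n = len(nums)
--     beautiful_count = 0
--
--     # Iterate over all possible even-length subarrays
--     for start in range(n):
--         for end in range(start + 1, n, 2):  # Ensure subarray length is even
--             mid = (start + end) // 2
--             if sum(nums[start:mid + 1]) == sum(nums[mid + 1:end + 1]):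
--                 beautiful_count += 1
--
--     return beautiful_count
-- ===== SOURCE B (Python) =====
-- def count_beautiful_subarrays(nums):
--     n = len(nums)
--     prefix = [0]
--     s = 0
--     for x in nums:
--         s += x
--         prefix.append(s)
--     count = 0
--     for start in range(n):
--         for k in range(1, (n - start) // 2 + 1):
--             if 2 * prefix[start + k] == prefix[start] + prefix[start + 2 * k]:
--                 count += 1
--     return count
-- ===== Notes on version B (the rewrite author's own statement) =====
-- stated objective: faster
-- what changed: Replaces the O(n) sum() of each half inside the double loop by a prefix-sum array built once, and iterates over half-lengths k instead of end indices, comparing 2*prefix[start+k] with prefix[start]+prefix[start+2k] in O(1).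
import Mathlib
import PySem

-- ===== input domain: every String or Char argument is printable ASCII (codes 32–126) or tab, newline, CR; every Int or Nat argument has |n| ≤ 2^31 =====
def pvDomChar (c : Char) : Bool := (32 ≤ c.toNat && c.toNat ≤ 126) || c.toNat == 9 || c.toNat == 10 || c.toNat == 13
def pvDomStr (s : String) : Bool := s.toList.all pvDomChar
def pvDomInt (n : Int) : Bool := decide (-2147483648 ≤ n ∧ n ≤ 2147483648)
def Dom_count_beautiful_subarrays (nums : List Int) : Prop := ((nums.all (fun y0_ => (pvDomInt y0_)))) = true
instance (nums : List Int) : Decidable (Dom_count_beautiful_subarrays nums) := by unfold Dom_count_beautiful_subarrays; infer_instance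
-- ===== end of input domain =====

-- B replaces the O(n) sum() of each half inside A's double loop by a prefix-sum array built
-- once, iterating over half-lengths; objective: faster (O(n^2) instead of O(n^3)).


-- ===== PORT A =====
def count_beautiful_subarrays (nums : List Int) : Int :=
  let n : Int := nums.length
  (PySem.List.pyRange 0 n 1).foldl (fun beautiful_count start =>
    (PySem.List.pyRange (start + 1) n 2).foldl (fun beautiful_count e =>
      let mid := PySem.Int.floordiv (start + e) 2
      if (PySem.List.slice nums (some start) (some (mid + 1))).sum ==
         (PySem.List.slice nums (some (mid + 1)) (some (e + 1))).sum
      then beautiful_count + 1 else beautiful_count) beautiful_count) 0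

-- ===== PORT B =====
def count_beautiful_subarrays_alt (nums : List Int) : Int :=
  let n : Int := nums.length
  -- s = 0; prefix = [0]; for x in nums: s += x; prefix.append(s)
  let sp := nums.foldl (fun (st : Int × List Int) x => (st.1 + x, st.2 ++ [st.1 + x])) ((0 : Int), [(0 : Int)])
  let pfx := sp.2
  (PySem.List.pyRange 0 n 1).foldl (fun count start =>
    (PySem.List.pyRange 1 (PySem.Int.floordiv (n - start) 2 + 1) 1).foldl (fun count k =>
      if 2 * PySem.List.pyGetD pfx (start + k) 0 ==
         PySem.List.pyGetD pfx start 0 + PySem.List.pyGetD pfx (start + 2 * k) 0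
      then count + 1 else count) count) 0

-- ===== PRECONDITION & SPEC =====
def Spec_count_beautiful_subarrays (nums : List Int) (out : Int) : Prop := out = count_beautiful_subarrays_alt nums
instance (nums : List Int) (out : Int) : Decidable (Spec_count_beautiful_subarrays nums out) := by unfold Spec_count_beautiful_subarrays; infer_instance

-- ===== CLAIM (what is proved, stated in full; the proofs are below) =====
def Claim_equal_count_beautiful_subarrays : Prop := ∀ (nums : List Int), Dom_count_beautiful_subarrays nums → Spec_count_beautiful_subarrays nums (count_beautiful_subarrays nums)

-- ===== LEMMAS AND PROOFS =====

-- Running-sum loop of B: closed form of the final state.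
theorem pvPrefix_spec (l : List Int) (s : Int) (P : List Int) :
    l.foldl (fun (st : Int × List Int) x => (st.1 + x, st.2 ++ [st.1 + x])) (s, P)
    = (s + l.sum, P ++ (List.range l.length).map (fun i => s + (l.take (i + 1)).sum)) := by
  induction l generalizing s P with
  | nil => simp
  | cons x xs ih =>
    simp only [List.foldl_cons, ih, List.length_cons, List.range_succ_eq_map, List.map_cons,
      List.map_map, List.sum_cons, List.take_succ_cons, List.sum_cons]
    simp [Function.comp_def, List.append_assoc, add_assoc]

theorem pvPfx_eq (nums : List Int) :
    (nums.foldl (fun (st : Int × List Int) x => (st.1 + x, st.2 ++ [st.1 + x])) ((0 : Int), [(0 : Int)])).2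
    = (List.range (nums.length + 1)).map (fun i => (nums.take i).sum) := by
  rw [pvPrefix_spec, List.range_succ_eq_map]
  simp [List.map_map, Function.comp_def]

theorem pvSum_drop_take (l : List Int) (a b : Nat) :
    ((l.drop a).take b).sum = (l.take (a + b)).sum - (l.take a).sum := by
  rw [List.take_add, List.sum_append]; ring

-- The two inner loops agree: A's loop over end indices start+1, start+3, … equals
-- B's loop over half-lengths 1 … (n-start)//2 with prefix sums.
theorem pvInner_eq (nums : List Int) (j : Nat) (acc : Int) :
    (PySem.List.pyRange ((j : Int) + 1) (nums.length : Int) 2).foldl (fun bc e =>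
      if (PySem.List.slice nums (some (j : Int)) (some (PySem.Int.floordiv ((j : Int) + e) 2 + 1))).sum ==
         (PySem.List.slice nums (some (PySem.Int.floordiv ((j : Int) + e) 2 + 1)) (some (e + 1))).sum
      then bc + 1 else bc) acc
    =
    (PySem.List.pyRange 1 (PySem.Int.floordiv ((nums.length : Int) - (j : Int)) 2 + 1) 1).foldl (fun cnt k =>
      if 2 * PySem.List.pyGetD ((List.range (nums.length + 1)).map (fun i => (nums.take i).sum)) ((j : Int) + k) 0 ==
         PySem.List.pyGetD ((List.range (nums.length + 1)).map (fun i => (nums.take i).sum)) (j : Int) 0 +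
         PySem.List.pyGetD ((List.range (nums.length + 1)).map (fun i => (nums.take i).sum)) ((j : Int) + 2 * k) 0
      then cnt + 1 else cnt) acc := by
  rw [PySem.List.pyRange_of_pos _ _ (by norm_num : (0:Int) < 2), PySem.List.pyRange_one,
    List.foldl_map, List.foldl_map]
  have hm : (if (j : Int) + 1 < (nums.length : Int)
        then (((nums.length : Int) - ((j : Int) + 1) + 2 - 1) / 2).toNat else 0)
      = ((PySem.Int.floordiv ((nums.length : Int) - (j : Int)) 2 + 1 - 1)).toNat := by
    rw [PySem.Int.floordiv_eq_ediv_of_pos (by norm_num)]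
    split_ifs with h <;> omega
  rw [hm]
  apply PySem.List.foldl_congr_mem
  intro bc k hk
  set len := nums.length with hlen
  rw [List.mem_range] at hk
  rw [PySem.Int.floordiv_eq_ediv_of_pos (by norm_num)] at hk
  -- bounds: j + 2*k + 2 ≤ len
  have hb : j + 2 * k + 2 ≤ len := by omega
  -- A's midpoint: (j + (j+1+2k)) // 2 = j + k
  have hmid : PySem.Int.floordiv ((j : Int) + ((j : Int) + 1 + 2 * (k : Int))) 2 = ((j + k : Nat) : Int) := by
    rw [PySem.Int.floordiv_eq_ediv_of_pos (by norm_num)]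
    push_cast; omega
  rw [hmid]
  have h1 : ((j + k : Nat) : Int) + 1 = ((j + k + 1 : Nat) : Int) := by push_cast; ring
  have h2 : (j : Int) + 1 + 2 * (k : Int) + 1 = ((j + 2 * k + 2 : Nat) : Int) := by push_cast; ring
  have h3 : (j : Int) + (1 + (k : Int)) = ((j + k + 1 : Nat) : Int) := by push_cast; ring
  have h4 : (j : Int) + 2 * (1 + (k : Int)) = ((j + 2 * k + 2 : Nat) : Int) := by push_cast; ring
  rw [h1, h2, h3, h4, PySem.List.slice_natCast, PySem.List.slice_natCast,
    PySem.List.pyGetD_natCast, PySem.List.pyGetD_natCast, PySem.List.pyGetD_natCast,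
    PySem.List.getD_map_range _ _ _ _ (by omega), PySem.List.getD_map_range _ _ _ _ (by omega),
    PySem.List.getD_map_range _ _ _ _ (by omega)]
  have e1 : j + k + 1 - j = k + 1 := by omega
  have e2 : j + 2 * k + 2 - (j + k + 1) = k + 1 := by omega
  rw [e1, e2, pvSum_drop_take, pvSum_drop_take]
  have e3 : j + (k + 1) = j + k + 1 := by omega
  have e4 : j + k + 1 + (k + 1) = j + 2 * k + 2 := by omega
  rw [e3, e4]
  have hc : (((nums.take (j + k + 1)).sum - (nums.take j).sum ==
        (nums.take (j + 2 * k + 2)).sum - (nums.take (j + k + 1)).sum))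
      = ((2 * (nums.take (j + k + 1)).sum == (nums.take j).sum + (nums.take (j + 2 * k + 2)).sum)) := by
    rw [Bool.eq_iff_iff]
    simp only [beq_iff_eq]
    omega
  rw [hc]

theorem pvMain (nums : List Int) :
    count_beautiful_subarrays nums = count_beautiful_subarrays_alt nums := by
  unfold count_beautiful_subarrays count_beautiful_subarrays_alt
  simp only [pvPfx_eq nums]
  rw [PySem.List.pyRange_one, List.foldl_map, List.foldl_map]
  apply PySem.List.foldl_congr_mem
  intro acc j _
  simp only [zero_add]
  exact pvInner_eq nums j acc

-- ===== VERDICT (by name: the statement is the Claim_ definition above) =====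
theorem count_beautiful_subarrays_spec : Claim_equal_count_beautiful_subarrays := by
  intro nums _
  unfold Spec_count_beautiful_subarrays
  exact pvMain nums
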